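-- pv_equiv track=rewrite | github.com/MadMatti/ID2222---Data-Mining | Homework_01/src/lsh.py | findSimilarPairs
-- ===== SOURCE A (Python) =====
-- from typing import List
--
-- def findSimilarPairs(signatures, band, threshold):
--     similarPairsSet = set()
--     segmentSize = len(signatures[0]) // band
--
--     def hashSegment(segment: List[int]) -> int:
--         return "-".join([str(i) for i in segment])
--
--     for i in range(band):
--         bucket = dict()
--         for j, signature in enumerate(signatures):
--             # we thrown away the last segment if it is not full
--             segmentHash = hashSegment(signature[i * segmentSize: (i + 1) * segmentSize])
--             if segmentHash not in bucket:
--                 bucket[segmentHash] = []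
--             bucket[segmentHash].append(j)
--         for _, v in bucket.items():
--             if len(v) > 1:
--                 for i in range(len(v)):
--                     for j in range(i + 1, len(v)):
--                         similarPairsSet.add((v[i], v[j]))
--     return list(similarPairsSet)
-- ===== SOURCE B (Python) =====
-- def findSimilarPairs(signatures, band, threshold):
--     similarPairsSet = set()
--     segmentSize = len(signatures[0]) // band
--     n = len(signatures)
--     for b in range(band):
--         keys = ["-".join(str(x) for x in sig[b * segmentSize:(b + 1) * segmentSize])
--                 for sig in signatures]
--         for j, k in enumerate(keys):
--             if k in keys[:j]:
--                 continue  # this key's group was already emitted at its first index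
--             members = [t for t in range(j, n) if keys[t] == k]
--             for a, x in enumerate(members):
--                 for y in members[a + 1:]:
--                     similarPairsSet.add((x, y))
--     return list(similarPairsSet)
-- ===== Notes on version B (the rewrite author's own statement) =====
-- stated objective: alternative
-- what changed: Replaced the dict-of-buckets grouping with a dict-free first-occurrence scan: per band it builds the list of segment keys once, and for every index whose key does not occur earlier it collects the matching indices by a forward scan and emits that group's pairs.
import Mathlib
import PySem

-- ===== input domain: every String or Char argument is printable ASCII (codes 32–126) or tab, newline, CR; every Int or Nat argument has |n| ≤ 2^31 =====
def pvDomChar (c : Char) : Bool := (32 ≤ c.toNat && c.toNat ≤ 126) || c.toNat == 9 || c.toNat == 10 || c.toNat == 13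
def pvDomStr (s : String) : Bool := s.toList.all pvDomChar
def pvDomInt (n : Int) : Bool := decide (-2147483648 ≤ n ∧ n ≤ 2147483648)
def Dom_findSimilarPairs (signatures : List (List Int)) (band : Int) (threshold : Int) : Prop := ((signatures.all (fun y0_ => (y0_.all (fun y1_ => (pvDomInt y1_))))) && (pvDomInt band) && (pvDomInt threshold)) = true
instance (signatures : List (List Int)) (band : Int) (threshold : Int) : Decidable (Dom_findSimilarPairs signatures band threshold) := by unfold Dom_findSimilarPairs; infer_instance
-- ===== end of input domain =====

-- B replaces A's dict-of-buckets grouping by a dict-free first-occurrence forward scan over a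
-- per-band key list (objective: alternative decomposition, not faster). Equivalence is about the
-- RETURN value; neither program mutates its arguments.

-- ===== PORT A =====
-- helper 'hashSegment' of A: "-".join([str(i) for i in segment])
def hashSegment (segment : List Int) : String :=
  PySem.Str.join "-" (segment.map PySem.Int.toStr)

-- Literal port of A. 'v[i]'/'v[j]' use pyGetD (indices come from range(len v), always in range).
def findSimilarPairs (signatures : List (List Int)) (band : Int) (threshold : Int) : List (Int × Int) :=
  let similarPairsSet : PySem.Set (Int × Int) := PySem.Set.empty
  -- len(signatures[0]) // band: pyGet? is none only for signatures = [], excluded by Pre_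
  let segmentSize : Int := PySem.Int.floordiv (PySem.List.len ((PySem.List.pyGet? signatures 0).getD [])) band
  (PySem.List.pyRange 0 band 1).foldl (fun similarPairsSet i =>
    let bucket : PySem.Dict String (List Int) :=
      (PySem.List.enumerate signatures).foldl (fun bucket js =>
        let segmentHash := hashSegment (PySem.List.slice js.2 (some (i * segmentSize)) (some ((i + 1) * segmentSize)))
        let bucket := if bucket.contains segmentHash then bucket else bucket.insert segmentHash []
        bucket.modify segmentHash [] (fun v => v ++ [js.1])) PySem.Dict.empty
    bucket.items.foldl (fun similarPairsSet kv =>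
      if PySem.List.len kv.2 > 1 then
        (PySem.List.pyRange 0 (PySem.List.len kv.2) 1).foldl (fun similarPairsSet a =>
          (PySem.List.pyRange (a + 1) (PySem.List.len kv.2) 1).foldl (fun similarPairsSet b =>
            PySem.Set.add similarPairsSet (PySem.List.pyGetD kv.2 a 0, PySem.List.pyGetD kv.2 b 0))
            similarPairsSet) similarPairsSet
      else similarPairsSet) similarPairsSet) similarPairsSet

-- ===== PORT B =====
-- Literal port of B (Source B). 'keys[t]' uses pyGetD (t from range(j, n), always in range).
def findSimilarPairs_alt (signatures : List (List Int)) (band : Int) (threshold : Int) : List (Int × Int) :=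
  let similarPairsSet : PySem.Set (Int × Int) := PySem.Set.empty
  let segmentSize : Int := PySem.Int.floordiv (PySem.List.len ((PySem.List.pyGet? signatures 0).getD [])) band
  let n : Int := PySem.List.len signatures
  (PySem.List.pyRange 0 band 1).foldl (fun similarPairsSet b =>
    let keys : List String := signatures.map (fun sig =>
      hashSegment (PySem.List.slice sig (some (b * segmentSize)) (some ((b + 1) * segmentSize))))
    (PySem.List.enumerate keys).foldl (fun similarPairsSet jk =>
      if (PySem.List.slice keys none (some jk.1)).contains jk.2 then similarPairsSet
      else
        let members : List Int :=
          (PySem.List.pyRange jk.1 n 1).foldl (fun members t =>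
            if PySem.List.pyGetD keys t "" == jk.2 then members ++ [t] else members) []
        (PySem.List.enumerate members).foldl (fun similarPairsSet ax =>
          (PySem.List.slice members (some (ax.1 + 1)) none).foldl (fun similarPairsSet y =>
            PySem.Set.add similarPairsSet (ax.2, y)) similarPairsSet) similarPairsSet)
      similarPairsSet) similarPairsSet

-- ===== PRECONDITION & SPEC =====
-- Pre_ excludes exactly the inputs where Python A raises: signatures = [] (IndexError on
-- signatures[0]) and band = 0 (ZeroDivisionError); B raises on the same inputs.
def Pre_findSimilarPairs (signatures : List (List Int)) (band : Int) (threshold : Int) : Prop :=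
  signatures ≠ [] ∧ band ≠ 0
instance (signatures : List (List Int)) (band : Int) (threshold : Int) : Decidable (Pre_findSimilarPairs signatures band threshold) := by unfold Pre_findSimilarPairs; infer_instance
def pvWitness_findSimilarPairs : List (List Int) × Int × Int := ([[1, 2, 3, 4], [1, 2, 9, 9], [1, 2, 3, 4]], 2, 0)
def Spec_findSimilarPairs (signatures : List (List Int)) (band : Int) (threshold : Int) (out : List (Int × Int)) : Prop := out = findSimilarPairs_alt signatures band threshold
instance (signatures : List (List Int)) (band : Int) (threshold : Int) (out : List (Int × Int)) : Decidable (Spec_findSimilarPairs signatures band threshold out) := by unfold Spec_findSimilarPairs; infer_instance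

-- ===== CLAIM (what is proved, stated in full; the proofs are below) =====
def Claim_equal_findSimilarPairs : Prop := ∀ (signatures : List (List Int)) (band : Int) (threshold : Int), Dom_findSimilarPairs signatures band threshold → Pre_findSimilarPairs signatures band threshold → Spec_findSimilarPairs signatures band threshold (findSimilarPairs signatures band threshold)

-- ===== LEMMAS AND PROOFS =====

def comb2 : List Int → List (Int × Int)
  | [] => []
  | x :: xs => xs.map (fun y => (x, y)) ++ comb2 xs

theorem update_foldl_flatMap {β : Type} (l : List β) (g : β → List (Int × Int))
    (s : PySem.Set (Int × Int)) :
    l.foldl (fun s x => PySem.Set.update s (g x)) s = PySem.Set.update s (l.flatMap g) := by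
  induction l generalizing s with
  | nil => simp [PySem.Set.update]
  | cons x xs ih => rw [List.foldl_cons, ih]; simp [PySem.Set.update, List.foldl_append]

theorem add_foldl_update (w : List Int) (x : Int) (s : PySem.Set (Int × Int)) :
    w.foldl (fun s y => PySem.Set.add s (x, y)) s = PySem.Set.update s (w.map (fun y => (x, y))) := by
  simp [PySem.Set.update, List.foldl_map]


theorem modify_step (d : PySem.Dict String (List Int)) (h : String) (v : Int) :
    (if d.contains h then d else d.insert h []).modify h [] (fun l => l ++ [v])
      = d.modify h [] (fun l => l ++ [v]) := by
  by_cases hc : d.contains h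
  · simp [hc]
  · rw [if_neg (by simp [hc])]
    simp only [PySem.Dict.modify, PySem.Dict.getD_insert_self,
      PySem.Dict.insert_insert_self,
      PySem.Dict.getD_of_not_contains d [] (by simpa using hc)]

theorem A_outer (v u : List Int) (s : PySem.Set (Int × Int)) :
    (PySem.List.pyRange ((u.length : Int)) (((u ++ v).length : Int)) 1).foldl (fun s a =>
      (PySem.List.pyRange (a + 1) (((u ++ v).length : Int)) 1).foldl (fun s b =>
        PySem.Set.add s (PySem.List.pyGetD (u ++ v) a 0, PySem.List.pyGetD (u ++ v) b 0)) s) s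
    = PySem.Set.update s (comb2 v) := by
  induction v generalizing u s with
  | nil => rw [PySem.List.pyRange_one_eq_nil (by simp)]; simp [comb2, PySem.Set.update]
  | cons x xs ih =>
    have hlt : ((u.length : Int)) < (((u ++ x :: xs).length : Int)) := by simp
    rw [PySem.List.pyRange_one_cons hlt, List.foldl_cons]
    have hx : PySem.List.pyGetD (u ++ x :: xs) ((u.length : Int)) 0 = x := by
      rw [PySem.List.pyGetD_natCast]
      simp [List.getD_eq_getElem?_getD]
    have hcast : ((u.length : Int)) + 1 = (((u ++ [x]).length : Int)) := by simp
    have happ : u ++ x :: xs = (u ++ [x]) ++ xs := by simp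
    -- inner loop at a = u.length
    have hinner : ∀ s : PySem.Set (Int × Int),
        (PySem.List.pyRange ((u.length : Int) + 1) (((u ++ x :: xs).length : Int)) 1).foldl (fun s b =>
          PySem.Set.add s (PySem.List.pyGetD (u ++ x :: xs) ((u.length : Int)) 0, PySem.List.pyGetD (u ++ x :: xs) b 0)) s
        = PySem.Set.update s (xs.map (fun y => (x, y))) := by
      intro s
      rw [PySem.List.foldl_pyRange_pyGetD' (u ++ x :: xs) 0
            (fun s y => PySem.Set.add s (PySem.List.pyGetD (u ++ x :: xs) ((u.length : Int)) 0, y)) s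
            (by positivity)]
      have hdrop : (u ++ x :: xs).drop (((u.length : Int) + 1)).toNat = xs := by
        have : (((u.length : Int) + 1)).toNat = u.length + 1 := by omega
        rw [this, happ]; rw [List.drop_append_of_le_length (by simp)]; simp
      rw [hdrop, hx, add_foldl_update]
    rw [hinner]
    conv_lhs =>
      rw [hcast, happ]
    rw [ih (u ++ [x])]
    simp [comb2, PySem.Set.update, List.foldl_append]

theorem A_pairs_loop (v : List Int) (s : PySem.Set (Int × Int)) :
    (if PySem.List.len v > 1 then
      (PySem.List.pyRange 0 (PySem.List.len v) 1).foldl (fun s a =>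
        (PySem.List.pyRange (a + 1) (PySem.List.len v) 1).foldl (fun s b =>
          PySem.Set.add s (PySem.List.pyGetD v a 0, PySem.List.pyGetD v b 0)) s) s
     else s) = PySem.Set.update s (comb2 v) := by
  by_cases hv : PySem.List.len v > 1
  · rw [if_pos hv]
    have := A_outer v [] s
    simpa using this
  · rw [if_neg hv]
    match v, hv with
    | [], _ => simp [comb2, PySem.Set.update]
    | [x], _ => simp [comb2, PySem.Set.update]
    | x :: y :: t, hv => simp [PySem.List.len] at hv

theorem B_outer (w : List Int) : ∀ (n c : Nat) (s : PySem.Set (Int × Int)), w.length - c ≤ n →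
    (PySem.List.enumerate (w.drop c) ((c : Int))).foldl (fun s ax =>
      (PySem.List.slice w (some (ax.1 + 1)) none).foldl (fun s y =>
        PySem.Set.add s (ax.2, y)) s) s = PySem.Set.update s (comb2 (w.drop c)) := by
  intro n
  induction n with
  | zero =>
    intro c s hn
    have : w.drop c = [] := List.drop_eq_nil_of_le (by omega)
    simp [this, PySem.List.enumerate_nil, comb2, PySem.Set.update]
  | succ n ih =>
    intro c s hn
    by_cases hc : c < w.length
    · have hdrop : w.drop c = w[c] :: w.drop (c + 1) := List.drop_eq_getElem_cons hc
      rw [hdrop, PySem.List.enumerate_cons, List.foldl_cons]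
      have hcast : ((c : Int)) + 1 = (((c + 1 : Nat) : Int)) := by push_cast; ring
      have hslice : PySem.List.slice w (some ((c : Int) + 1)) none = w.drop (c + 1) := by
        rw [hcast, PySem.List.slice_from_natCast]
      rw [hslice, add_foldl_update, hcast, ih (c + 1) _ (by omega)]
      simp [comb2, PySem.Set.update, List.foldl_append]
    · have : w.drop c = [] := List.drop_eq_nil_of_le (by omega)
      simp [this, PySem.List.enumerate_nil, comb2, PySem.Set.update]

theorem B_pairs_loop (g : List Int) (s : PySem.Set (Int × Int)) :
    (PySem.List.enumerate g).foldl (fun s ax =>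
      (PySem.List.slice g (some (ax.1 + 1)) none).foldl (fun s y =>
        PySem.Set.add s (ax.2, y)) s) s = PySem.Set.update s (comb2 g) := by
  have := B_outer g g.length 0 s (by omega)
  simpa using this

theorem bucketA_eq (sigs : List (List Int)) (f : List Int → String) :
    (PySem.List.enumerate sigs).foldl (fun bucket js =>
       let h := f js.2
       let bucket' := if bucket.contains h then bucket else bucket.insert h []
       bucket'.modify h [] (fun v => v ++ [js.1])) PySem.Dict.empty
    = ((PySem.List.enumerate sigs).map (fun js => (f js.2, js.1))).foldl
        (fun d p => d.modify p.1 [] (fun v => v ++ [p.2])) PySem.Dict.empty := by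
  rw [List.foldl_map]
  exact PySem.List.foldl_congr_mem _ _ _ _ (fun acc x _ => modify_step acc (f x.2) x.1)

theorem range_filter_eq (K : List String) (k : String) :
    (PySem.List.pyRange 0 ((K.length : Int)) 1).filter (fun t => PySem.List.pyGetD K t "" == k)
    = ((PySem.List.enumerate K).filter (fun p => p.2 == k)).map (fun p => p.1) := by
  have he := PySem.List.enumerate_eq_map_pyRange K ""
  simp only [PySem.List.len_eq] at he
  rw [he, List.filter_map, List.map_map]
  simp [Function.comp_def]

theorem membersB_eq (K : List String) (kk : Nat) (hk : kk < K.length)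
    (hfo : K[kk] ∉ K.take kk) :
    (PySem.List.pyRange ((kk : Int)) ((K.length : Int)) 1).filter (fun t => PySem.List.pyGetD K t "" == K[kk])
    = ((PySem.List.enumerate K).filter (fun p => p.2 == K[kk])).map (fun p => p.1) := by
  rw [← range_filter_eq]
  rw [PySem.List.pyRange_one_append 0 (kk : Int) ((K.length : Int)) (by positivity) (by omega)]
  rw [List.filter_append]
  have hnil : (PySem.List.pyRange 0 ((kk : Int)) 1).filter (fun t => PySem.List.pyGetD K t "" == K[kk]) = [] := by
    rw [List.filter_eq_nil_iff]
    intro t ht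
    rw [PySem.List.mem_pyRange_one] at ht
    rw [PySem.List.pyGetD_eq_getElem (xs := K) (i := t) (d := "") (by omega) (by omega)]
    simp only [beq_iff_eq]
    intro heq
    apply hfo
    rw [← heq]
    have htn : t.toNat < kk := by omega
    have : (K.take kk)[t.toNat]'(by simp; omega) = K[t.toNat] := List.getElem_take
    rw [← this]
    exact List.getElem_mem _
  rw [hnil, List.nil_append]

theorem firstocc_map_snd (K : List String) :
    ((PySem.List.enumerate K).filter (fun jk => !((PySem.List.slice K none (some jk.1)).contains jk.2))).map (fun p => p.2)
    = PySem.Set.ofList K := by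
  induction K using List.reverseRecOn with
  | nil => simp [PySem.List.enumerate_nil, PySem.Set.ofList_eq_foldl]
  | append_singleton K x ih =>
    rw [PySem.List.enumerate_append, List.filter_append, List.map_append]
    have h1 : (PySem.List.enumerate K).filter (fun jk => !((PySem.List.slice (K ++ [x]) none (some jk.1)).contains jk.2))
            = (PySem.List.enumerate K).filter (fun jk => !((PySem.List.slice K none (some jk.1)).contains jk.2)) := by
      apply List.filter_congr
      intro p hp
      rcases (PySem.List.mem_enumerate_iff K 0 p).1 hp with ⟨kk, hkk, rfl⟩
      have hc : (0 : Int) + (kk : Int) = ((kk : Nat) : Int) := by push_cast; ring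
      rw [hc, PySem.List.slice_to_natCast, PySem.List.slice_to_natCast,
        List.take_append_of_le_length (by omega)]
    rw [h1, ih]
    have h2 : PySem.List.enumerate [x] (0 + (K.length : Int)) = [((K.length : Int), x)] := by
      simp [PySem.List.enumerate_cons, PySem.List.enumerate_nil]
    rw [h2]
    have h3 : PySem.List.slice (K ++ [x]) none (some ((K.length : Int))) = K := by
      rw [PySem.List.slice_to_natCast, List.take_append_of_le_length (by omega), List.take_length]
    have h4 : PySem.Set.ofList (K ++ [x]) = PySem.Set.add (PySem.Set.ofList K) x := by
      rw [PySem.Set.ofList_eq_foldl, List.foldl_append, ← PySem.Set.ofList_eq_foldl]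
      rfl
    rw [h4]
    by_cases hx : x ∈ K
    · simp only [List.filter_cons, List.filter_nil, h3]
      simp [PySem.Set.add, hx]
    · simp only [List.filter_cons, List.filter_nil, h3]
      simp [PySem.Set.add, hx]

theorem enumerate_map {α β : Type} (f : α → β) (xs : List α) (s : Int) :
    PySem.List.enumerate (xs.map f) s = (PySem.List.enumerate xs s).map (fun p => (p.1, f p.2)) := by
  induction xs generalizing s with
  | nil => simp [PySem.List.enumerate_nil]
  | cons x xs ih => simp [PySem.List.enumerate_cons, ih]

-- members characterization used on the B side
theorem memf_eq (sigs : List (List Int)) (f : List Int → String) (k : String) :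
    ((((PySem.List.enumerate sigs).map (fun js => (f js.2, js.1))).filter (fun p => p.1 == k)).map (fun p => p.2))
    = (((PySem.List.enumerate (sigs.map f)).filter (fun p => p.2 == k)).map (fun p => p.1)) := by
  rw [enumerate_map, List.filter_map, List.filter_map, List.map_map, List.map_map]
  rfl

-- the keys the A-side dict collects, in order
theorem keysL_eq (sigs : List (List Int)) (f : List Int → String) :
    (((PySem.List.enumerate sigs).map (fun js => (f js.2, js.1))).map (fun p => p.1)) = sigs.map f := by
  rw [List.map_map]
  have : ((fun p => p.1) ∘ fun js : Int × List Int => (f js.2, js.1)) = (fun js : Int × List Int => f js.2) := rfl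
  rw [this, show (fun js : Int × List Int => f js.2) = f ∘ (fun js : Int × List Int => js.2) from rfl,
    ← List.map_map, PySem.List.map_snd_enumerate]

theorem flatMap_congr_mem {α : Type} (l : List α) (g1 g2 : α → List (Int × Int))
    (h : ∀ x ∈ l, g1 x = g2 x) : l.flatMap g1 = l.flatMap g2 := by
  induction l with
  | nil => rfl
  | cons x xs ih =>
    simp only [List.flatMap_cons, h x (by simp)]
    rw [ih (fun y hy => h y (by simp [hy]))]

theorem band_eq (sigs : List (List Int)) (f : List Int → String) (s : PySem.Set (Int × Int)) :
    (let bucket : PySem.Dict String (List Int) :=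
      (PySem.List.enumerate sigs).foldl (fun bucket js =>
        let h := f js.2
        let bucket' := if bucket.contains h then bucket else bucket.insert h []
        bucket'.modify h [] (fun v => v ++ [js.1])) PySem.Dict.empty
     bucket.items.foldl (fun s kv =>
       if PySem.List.len kv.2 > 1 then
         (PySem.List.pyRange 0 (PySem.List.len kv.2) 1).foldl (fun s a =>
           (PySem.List.pyRange (a + 1) (PySem.List.len kv.2) 1).foldl (fun s b =>
             PySem.Set.add s (PySem.List.pyGetD kv.2 a 0, PySem.List.pyGetD kv.2 b 0)) s) s
       else s) s)
    = (let keys := sigs.map f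
       (PySem.List.enumerate keys).foldl (fun s jk =>
         if (PySem.List.slice keys none (some jk.1)).contains jk.2 then s
         else
           let members : List Int :=
             (PySem.List.pyRange jk.1 ((sigs.length : Int)) 1).foldl (fun members t =>
               if PySem.List.pyGetD keys t "" == jk.2 then members ++ [t] else members) []
           (PySem.List.enumerate members).foldl (fun s ax =>
             (PySem.List.slice members (some (ax.1 + 1)) none).foldl (fun s y =>
               PySem.Set.add s (ax.2, y)) s) s) s) := by
  set K := sigs.map f with hK
  set L := (PySem.List.enumerate sigs).map (fun js => (f js.2, js.1)) with hL
  set memf : String → List Int := fun k => (L.filter (fun p => p.1 == k)).map (fun p => p.2) with hmemf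
  -- ===== A side =====
  rw [show (let bucket : PySem.Dict String (List Int) :=
      (PySem.List.enumerate sigs).foldl (fun bucket js =>
        let h := f js.2
        let bucket' := if bucket.contains h then bucket else bucket.insert h []
        bucket'.modify h [] (fun v => v ++ [js.1])) PySem.Dict.empty
     bucket.items.foldl (fun s kv =>
       if PySem.List.len kv.2 > 1 then
         (PySem.List.pyRange 0 (PySem.List.len kv.2) 1).foldl (fun s a =>
           (PySem.List.pyRange (a + 1) (PySem.List.len kv.2) 1).foldl (fun s b =>
             PySem.Set.add s (PySem.List.pyGetD kv.2 a 0, PySem.List.pyGetD kv.2 b 0)) s) s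
       else s) s)
    = PySem.Set.update s ((PySem.Set.ofList K).flatMap (fun k => comb2 (memf k))) from ?_]
  · dsimp only
    rw [PySem.List.foldl_congr_mem _ _ (fun s jk =>
        if (!(PySem.List.slice K none (some jk.1)).contains jk.2) = true then
          (let members : List Int :=
             (PySem.List.pyRange jk.1 ((sigs.length : Int)) 1).foldl (fun members t =>
               if PySem.List.pyGetD K t "" == jk.2 then members ++ [t] else members) []
           (PySem.List.enumerate members).foldl (fun s ax =>
             (PySem.List.slice members (some (ax.1 + 1)) none).foldl (fun s y =>
               PySem.Set.add s (ax.2, y)) s) s)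
        else s) _
      (by intro acc x _; by_cases hc : (PySem.List.slice K none (some x.1)).contains x.2 <;> simp [hc])]
    rw [PySem.List.foldl_if_eq_foldl_filter]
    rw [PySem.List.foldl_congr_mem _ _ (fun s jk => PySem.Set.update s
        (comb2 ((PySem.List.pyRange jk.1 ((sigs.length : Int)) 1).filter
          (fun t => PySem.List.pyGetD K t "" == jk.2)))) _ ?memb]
    case memb =>
      intro acc x _
      dsimp only
      rw [show (PySem.List.pyRange x.1 ((sigs.length : Int)) 1).foldl (fun members t =>
            if PySem.List.pyGetD K t "" == x.2 then members ++ [t] else members) []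
          = (PySem.List.pyRange x.1 ((sigs.length : Int)) 1).filter
              (fun t => PySem.List.pyGetD K t "" == x.2) from by
        rw [PySem.List.foldl_append_if_eq_filter]; simp]
      exact B_pairs_loop _ acc
    rw [update_foldl_flatMap]
    congr 1
    rw [← firstocc_map_snd K, List.flatMap_map]
    apply flatMap_congr_mem
    intro jk hjk
    rw [List.mem_filter] at hjk
    obtain ⟨hjkE, hgood⟩ := hjk
    rcases (PySem.List.mem_enumerate_iff K 0 jk).1 hjkE with ⟨kk, hkk, rfl⟩
    dsimp only
    have hcast : (0 : Int) + (kk : Int) = ((kk : Nat) : Int) := by push_cast; ring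
    have hfo : K[kk] ∉ K.take kk := by
      simp only [hcast, PySem.List.slice_to_natCast] at hgood
      simpa using hgood
    have hlen : ((sigs.length : Int)) = ((K.length : Int)) := by simp [hK]
    simp only [hmemf, hL]
    rw [memf_eq sigs f K[kk], ← hK, hcast, hlen, membersB_eq K kk hkk hfo]
  · -- A-side computation
    show _ = _
    dsimp only
    rw [bucketA_eq, ← hL]
    have hnodup : ((L.foldl (fun d p => d.modify p.1 [] (fun v => v ++ [p.2])) PySem.Dict.empty)).keys.Nodup :=
      PySem.Dict.nodup_keys_foldl_modify_key L (fun p => p.1) [] (fun _ p => (fun v => v ++ [p.2])) PySem.Dict.empty (by simp)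
    rw [PySem.Dict.items_eq_map_keys _ hnodup []]
    rw [List.foldl_map]
    rw [PySem.List.foldl_congr_mem _ _ (fun s k =>
        PySem.Set.update s (comb2 ((L.foldl (fun d p => d.modify p.1 [] (fun v => v ++ [p.2])) PySem.Dict.empty).getD k []))) _
      (fun acc k _ => A_pairs_loop _ acc)]
    have hgetD : ∀ k, (L.foldl (fun d p => d.modify p.1 [] (fun v => v ++ [p.2])) PySem.Dict.empty).getD k [] = memf k := by
      intro k
      rw [PySem.Dict.getD_foldl_modify_append L PySem.Dict.empty k]
      simp [hmemf]
    have hkeys : (L.foldl (fun d p => d.modify p.1 [] (fun v => v ++ [p.2])) PySem.Dict.empty).keys = PySem.Set.ofList K := by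
      rw [PySem.Dict.keys_foldl_modify_key L (fun p => p.1) [] (fun _ p => (fun v => v ++ [p.2])) PySem.Dict.empty]
      rw [PySem.Dict.keys_empty]
      rw [show L.map (fun p => p.1) = K from keysL_eq sigs f]
      simp [PySem.Set.update, PySem.Set.ofList_eq_foldl]
    simp only [hgetD, hkeys]
    rw [update_foldl_flatMap]

-- ===== VERDICT (by name: the statement is the Claim_ definition above) =====
theorem findSimilarPairs_spec : Claim_equal_findSimilarPairs := by
  unfold Claim_equal_findSimilarPairs
  intro signatures band threshold _ _
  unfold Spec_findSimilarPairs findSimilarPairs findSimilarPairs_alt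
  dsimp only
  apply PySem.List.foldl_congr_mem
  intro acc i _
  have h := band_eq signatures (fun sig => hashSegment (PySem.List.slice sig
      (some (i * PySem.Int.floordiv (PySem.List.len ((PySem.List.pyGet? signatures 0).getD [])) band))
      (some ((i + 1) * PySem.Int.floordiv (PySem.List.len ((PySem.List.pyGet? signatures 0).getD [])) band)))) acc
  simp only [PySem.List.len_eq] at h ⊢
  exact h
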